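-- pv_equiv track=rewrite | github.com/rlagusgh0223/Algorithm | 240428/프로그래머스, 진료순서 정하기.py | solution
-- ===== SOURCE A (Python) =====
-- def solution(emergency):
--     answer = [1] * len(emergency)
--     for i in range(len(emergency)):
--         for j in range(len(emergency)):
--             if i == j:
--                 continue
--             if emergency[i] < emergency[j]:
--                 answer[i] += 1
--     return answer
-- ===== SOURCE B (Python) =====
-- def solution(emergency):
--     # rank = 1 + number of strictly greater values: sort descending once,
--     # record the rank of each value's first occurrence, then look ranks up.
--     rank = {}
--     for idx, v in enumerate(sorted(emergency, reverse=True)):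
--         if v not in rank:
--             rank[v] = idx + 1
--     return [rank[v] for v in emergency]
-- ===== Notes on version B (the rewrite author's own statement) =====
-- stated objective: faster
-- what changed: Replaced the O(n^2) all-pairs comparison with one descending sort plus a first-occurrence rank dictionary, then a single lookup pass.
import Mathlib
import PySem

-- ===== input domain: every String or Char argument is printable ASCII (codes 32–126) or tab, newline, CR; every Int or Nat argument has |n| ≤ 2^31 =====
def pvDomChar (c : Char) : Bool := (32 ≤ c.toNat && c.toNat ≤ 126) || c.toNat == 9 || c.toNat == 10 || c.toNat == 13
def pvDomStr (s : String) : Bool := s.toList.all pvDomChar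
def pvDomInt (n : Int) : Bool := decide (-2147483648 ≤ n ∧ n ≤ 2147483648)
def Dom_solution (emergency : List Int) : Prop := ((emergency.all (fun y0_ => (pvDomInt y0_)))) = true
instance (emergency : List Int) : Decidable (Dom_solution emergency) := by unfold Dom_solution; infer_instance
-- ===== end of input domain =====

-- B replaces A's O(n^2) all-pairs comparison loop by one descending sort plus a
-- first-occurrence rank dictionary and a single lookup pass.

-- ===== PORT A =====
-- answer[i] += 1 is List.modify at i.toNat; i comes from range(len(emergency)), so it is
-- nonnegative and in range and .toNat is exact here.
def solution (emergency : List Int) : List Int :=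
  let n : Int := PySem.List.len emergency
  let answer : List Int := List.replicate emergency.length (1 : Int)
  (PySem.List.pyRange 0 n 1).foldl (fun ans i =>
    (PySem.List.pyRange 0 n 1).foldl (fun ans j =>
      if i == j then ans
      else if PySem.List.pyGetD emergency i 0 < PySem.List.pyGetD emergency j 0 then
        ans.modify i.toNat (· + 1)
      else ans) ans) answer

-- ===== PORT B =====
-- rank[v] in the final comprehension never raises (every v occurs in the sorted copy),
-- so it is ported as getD with an unused default 0.
def solution_alt (emergency : List Int) : List Int :=
  let s := PySem.List.sorted emergency (fun x => x) true
  let rank := (PySem.List.enumerate s 0).foldl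
    (fun d p => if d.contains p.2 then d else d.insert p.2 (p.1 + 1)) PySem.Dict.empty
  emergency.map (fun v => rank.getD v 0)

-- ===== PRECONDITION & SPEC =====
def Spec_solution (emergency : List Int) (out : List Int) : Prop := out = solution_alt emergency
instance (emergency : List Int) (out : List Int) : Decidable (Spec_solution emergency out) := by unfold Spec_solution; infer_instance

-- ===== CLAIM (what is proved, stated in full; the proofs are below) =====
def Claim_equal_solution : Prop := ∀ (emergency : List Int), Dom_solution emergency → Spec_solution emergency (solution emergency)

-- ===== LEMMAS AND PROOFS =====

-- the common value of both programs: each element's rank is 1 + the number of strictly greater elements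
def rankSpec (e : List Int) : List Int :=
  e.map (fun v => 1 + ((e.countP (fun w => decide (v < w))) : Int))

theorem rank_get (s : List Int) (k : Int) (d : PySem.Dict Int Int) (v : Int) :
    ((PySem.List.enumerate s k).foldl
      (fun d p => if d.contains p.2 then d else d.insert p.2 (p.1 + 1)) d).get? v
    = if d.contains v then d.get? v
      else (PySem.List.index? s v).map (fun i => (k + (i : Int) + 1 : Int)) := by
  induction s generalizing k d with
  | nil =>
    simp only [PySem.List.enumerate_nil, List.foldl_nil, PySem.List.index?, List.idxOf?_nil]
    split_ifs with hc
    · rfl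
    · exact (PySem.Dict.get?_eq_none_iff_contains d v).2 (by simpa using hc)
  | cons x xs ih =>
    rw [PySem.List.enumerate_cons]
    simp only [List.foldl_cons]
    by_cases hxv : x = v
    · subst hxv
      by_cases hc : d.contains x
      · simp [hc, ih]
      · simp only [hc]
        rw [ih]
        rw [PySem.List.index?_cons_self]
        simp [PySem.Dict.contains_insert_self, PySem.Dict.get?_insert_self]
    · have h1 := PySem.List.index?_cons_of_ne xs hxv
      by_cases hc : d.contains x
      · rw [if_pos hc, ih, h1]
        by_cases hv : d.contains v
        · simp [hv]
        · simp only [hv]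
          cases PySem.List.index? xs v
          · simp
          · simp
            ring
      · rw [if_neg hc, ih, h1]
        have hcv : (d.insert x (k+1)).contains v = d.contains v := by
          rw [PySem.Dict.contains_insert]
          simp [Ne.symm hxv]
        rw [hcv, PySem.Dict.get?_insert_of_ne d _ (Ne.symm hxv)]
        by_cases hv : d.contains v
        · simp [hv]
        · simp only [hv]
          cases PySem.List.index? xs v
          · simp
          · simp
            ring

theorem index_desc (s : List Int) (v : Int)
    (hs : s.Pairwise (fun a b => b ≤ a)) (hv : v ∈ s) :
    PySem.List.index? s v = some (s.countP (fun w => decide (v < w))) := by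
  induction s with
  | nil => cases hv
  | cons x xs ih =>
    rcases List.pairwise_cons.1 hs with ⟨hx, hxs⟩
    by_cases hxv : x = v
    · subst hxv
      rw [PySem.List.index?_cons_self]
      have : (x :: xs).countP (fun w => decide (x < w)) = 0 := by
        rw [List.countP_eq_zero]
        intro w hw
        simp only [List.mem_cons] at hw
        rcases hw with rfl | hw
        · simp
        · simpa using not_lt.2 (hx w hw)
      rw [this]
    · have hvxs : v ∈ xs := by
        rcases List.mem_cons.1 hv with rfl | h
        · exact absurd rfl hxv
        · exact h
      rw [PySem.List.index?_cons_of_ne xs hxv, ih hxs hvxs]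
      have hvx : decide (v < x) = true := by
        simp only [decide_eq_true_iff]
        exact lt_of_le_of_ne (hx v hvxs) (fun h => hxv h.symm)
      simp [hvx]

theorem solution_alt_eq_rankSpec (e : List Int) : solution_alt e = rankSpec e := by
  unfold solution_alt rankSpec
  apply List.map_congr_left
  intro v hv
  set s := PySem.List.sorted e (fun x => x) true with hsdef
  have hperm : s.Perm e := PySem.List.sorted_perm e (fun x => x) true
  have hvs : v ∈ s := hperm.mem_iff.2 hv
  have hidx : PySem.List.index? s v = some (s.countP (fun w => decide (v < w))) :=
    index_desc s v (PySem.List.sorted_pairwise_rev e (fun x => x)) hvs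
  have hget := rank_get s 0 PySem.Dict.empty v
  rw [PySem.Dict.contains_empty] at hget
  simp only [if_false, Bool.false_eq_true] at hget
  rw [PySem.Dict.getD_eq_get?_getD, hget, hidx]
  have hc : s.countP (fun w => decide (v < w)) = e.countP (fun w => decide (v < w)) :=
    hperm.countP_eq _
  simp [hc]
  ring

theorem modify_modify (l : List Int) (n : Nat) (f g : Int → Int) :
    (l.modify n f).modify n g = l.modify n (fun x => g (f x)) := by
  apply List.ext_getElem
  · simp
  · intro i h1 h2
    simp only [List.getElem_modify]
    split_ifs <;> rfl

theorem modify_add_zero (l : List Int) (n : Nat) :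
    l.modify n (fun x => x + 0) = l := by
  apply List.ext_getElem
  · simp
  · intro i h1 h2
    simp [List.getElem_modify]

-- inner loop: all increments land on index i.toNat
theorem inner_loop (e : List Int) (i : Int) (L : List Int) (ans : List Int) :
    L.foldl (fun ans j =>
      if i == j then ans
      else if PySem.List.pyGetD e i 0 < PySem.List.pyGetD e j 0 then
        ans.modify i.toNat (· + 1)
      else ans) ans
    = ans.modify i.toNat
        (· + (L.countP (fun j => !(i == j) && decide (PySem.List.pyGetD e i 0 < PySem.List.pyGetD e j 0)) : Int)) := by
  induction L generalizing ans with
  | nil =>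
    simp only [List.foldl_nil, List.countP_nil, Nat.cast_zero]
    exact (modify_add_zero ans i.toNat).symm
  | cons j0 L ih =>
    simp only [List.foldl_cons, List.countP_cons]
    by_cases hij : i = j0
    · subst hij
      have hb : (i == i) = true := by simp
      rw [if_pos hb, ih]
      simp
    · have hb : (i == j0) = false := by simpa using hij
      rw [hb]
      simp only [Bool.not_false, Bool.true_and, if_false, Bool.false_eq_true]
      by_cases hlt : PySem.List.pyGetD e i 0 < PySem.List.pyGetD e j0 0
      · rw [if_pos hlt, ih, modify_modify]
        simp only [decide_eq_true_iff.2 hlt]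
        congr 1
        funext x
        push_cast
        ring
      · rw [if_neg hlt, ih]
        simp only [decide_eq_false hlt]
        norm_num

-- the count accumulated at outer index i
def cnt (e : List Int) (i : Int) : Nat :=
  (PySem.List.pyRange 0 (PySem.List.len e) 1).countP
    (fun j => !(i == j) && decide (PySem.List.pyGetD e i 0 < PySem.List.pyGetD e j 0))

theorem outer_loop (e : List Int) (k : Nat) (hk : k ≤ e.length) :
    (PySem.List.pyRange 0 (k : Int) 1).foldl (fun ans i =>
      (PySem.List.pyRange 0 (PySem.List.len e) 1).foldl (fun ans j =>
        if i == j then ans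
        else if PySem.List.pyGetD e i 0 < PySem.List.pyGetD e j 0 then
          ans.modify i.toNat (· + 1)
        else ans) ans) (List.replicate e.length (1 : Int))
    = (List.range e.length).map
        (fun m => if m < k then 1 + (cnt e (m : Int) : Int) else 1) := by
  induction k with
  | zero =>
    simp [PySem.List.pyRange_one_eq_nil, List.map_const']
  | succ k ih =>
    have hk' : k ≤ e.length := Nat.le_of_succ_le hk
    have hsplit : PySem.List.pyRange 0 ((k+1 : Nat) : Int) 1
        = PySem.List.pyRange 0 (k : Int) 1 ++ [(k : Int)] := by
      push_cast
      exact PySem.List.pyRange_one_succ_right (by positivity)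
    rw [hsplit, List.foldl_append, List.foldl_cons, List.foldl_nil, ih hk', inner_loop]
    have htn : ((k : Int)).toNat = k := Int.toNat_natCast k
    rw [htn]
    apply List.ext_getElem
    · simp
    · intro m h1 h2
      simp only [List.getElem_modify, List.getElem_map, List.getElem_range]
      have : cnt e ((k : Nat) : Int) = (PySem.List.pyRange 0 (PySem.List.len e) 1).countP
        (fun j => !((k : Int) == j) && decide (PySem.List.pyGetD e (k : Int) 0 < PySem.List.pyGetD e j 0)) := rfl
      rw [List.length_map, List.length_range] at h2
      by_cases hmk : k = m
      · subst hmk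
        simp [cnt]
      · rw [if_neg hmk]
        by_cases hlt : m < k
        · have : m < k + 1 := by omega
          simp [hlt, this]
        · have h2' : ¬ (m < k + 1) := by omega
          simp [hlt, h2']

theorem countP_range (e : List Int) (v : Int) :
    (PySem.List.pyRange 0 (PySem.List.len e) 1).countP
      (fun j => decide (v < PySem.List.pyGetD e j 0))
    = e.countP (fun w => decide (v < w)) := by
  conv_rhs => rw [← PySem.List.map_pyGetD_pyRange_zero e 0]
  rw [List.countP_map]
  rfl

theorem cnt_eq (e : List Int) (m : Nat) (hm : m < e.length) :
    cnt e (m : Int) = e.countP (fun w => decide (e[m] < w)) := by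
  unfold cnt
  have hv : PySem.List.pyGetD e (m : Int) 0 = e[m] := by
    simp [PySem.List.pyGetD_natCast, List.getD_eq_getElem?_getD, hm]
  have hstep : ∀ j ∈ PySem.List.pyRange 0 (PySem.List.len e) 1,
      ((!((m : Int) == j) && decide (PySem.List.pyGetD e (m : Int) 0 < PySem.List.pyGetD e j 0)) = true
        ↔ decide (PySem.List.pyGetD e (m : Int) 0 < PySem.List.pyGetD e j 0) = true) := by
    intro j _
    by_cases hj : (m : Int) = j
    · subst hj
      simp
    · simp [hj]
  rw [List.countP_congr hstep, countP_range, hv]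

theorem solution_eq_rankSpec (e : List Int) : solution e = rankSpec e := by
  simp only [solution, rankSpec]
  have hlen : PySem.List.len e = ((e.length : Nat) : Int) := by simp [PySem.List.len]
  have ho := outer_loop e e.length (le_refl _)
  rw [hlen] at ho
  rw [hlen, ho]
  apply List.ext_getElem
  · simp
  · intro m h1 h2
    rw [List.length_map, List.length_range] at h1
    simp only [List.getElem_map, List.getElem_range, if_pos h1]
    rw [cnt_eq e m h1]
-- ===== VERDICT (by name: the statement is the Claim_ definition above) =====
theorem solution_spec : Claim_equal_solution := by
  intro e _
  unfold Spec_solution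
  rw [solution_eq_rankSpec, solution_alt_eq_rankSpec]
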